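-- pv_equiv track=rewrite | github.com/wylited/hkcert | wyli/Part 2/mypoc/easyvm_class/easyvm_overflow.py | encrypt2
-- ===== SOURCE A (Python) =====
-- def encrypt2(key):
--     init_scmgr = key
--     g_table = [init_scmgr]
--     for i in range(31):
--         init_scmgr = (init_scmgr * 69069) & 0xffffffff
--         g_table.append(init_scmgr)
--
--     g_index = 0
--     v0 = (g_index-1) & 0x1f
--     v2 = g_table[(g_index + 3) & 0x1f] ^ g_table[g_index] ^ (g_table[(g_index + 3) & 0x1f] >> 8)
--     v1 = g_table[v0]
--     v3 = g_table[(g_index + 10) & 0x1F]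
--     v4 = g_table[(g_index - 8) & 0x1F] ^ v3 ^ ((v3 ^ (32 * g_table[(g_index - 8) & 0x1F])) << 14)
--     v4 = v4 & 0xffffffff
--     g_table[g_index] = v2 ^ v4
--     g_table[v0] = (v1 ^ v2 ^ v4 ^ ((v2 ^ (16 * (v1 ^ 4 * v4))) << 7)) & 0xffffffff
--     g_index = (g_index - 1) & 0x1F
--     return g_table[g_index]
-- ===== SOURCE B (Python) =====
-- def encrypt2(key):
--     # Closed form: after the PRNG loop, g_table[i] = (key * 69069**i) & 0xffffffff for i >= 1
--     # and g_table[0] = key (unmasked).  Only indices 0, 3, 10, 24, 31 are ever read.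
--     M = 1 << 32
--     def entry(i):
--         return key if i == 0 else (key * pow(69069, i, M)) & 0xffffffff
--     t0, t3, t10, t24, t31 = entry(0), entry(3), entry(10), entry(24), entry(31)
--     v2 = t3 ^ t0 ^ (t3 >> 8)
--     v4 = (t24 ^ t10 ^ ((t10 ^ (32 * t24)) << 14)) & 0xffffffff
--     return (t31 ^ v2 ^ v4 ^ ((v2 ^ (16 * (t31 ^ 4 * v4))) << 7)) & 0xffffffff
-- ===== Notes on version B (the rewrite author's own statement) =====
-- stated objective: simpler
-- what changed: B replaces A's sequential 31-iteration PRNG table build (and the table mutations) by a closed-form entry key*69069^i mod 2^32 computed only at the five indices (0, 3, 10, 24, 31) the final bit-mixing actually reads.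
import Mathlib
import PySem

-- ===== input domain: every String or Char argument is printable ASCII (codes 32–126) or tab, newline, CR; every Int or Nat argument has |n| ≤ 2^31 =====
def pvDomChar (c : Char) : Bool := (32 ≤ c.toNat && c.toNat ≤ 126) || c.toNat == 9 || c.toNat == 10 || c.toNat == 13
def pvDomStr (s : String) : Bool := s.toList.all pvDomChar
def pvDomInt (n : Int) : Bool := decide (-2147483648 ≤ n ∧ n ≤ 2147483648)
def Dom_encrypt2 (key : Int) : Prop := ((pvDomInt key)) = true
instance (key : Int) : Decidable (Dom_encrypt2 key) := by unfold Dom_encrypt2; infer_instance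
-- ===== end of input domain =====

-- B replaces A's 31-step sequential PRNG table loop by a closed-form entry
-- (key * 69069^i mod 2^32) computed only at the five indices the mixing reads (objective: simpler).

-- ===== PORT A =====
def encrypt2 (key : Int) : Int :=
  let init_scmgr := key
  let st := (PySem.List.pyRange 0 31 1).foldl
    (fun (s : Int × List Int) _ =>
      let v := PySem.Int.band (s.1 * 69069) 0xffffffff
      (v, s.2 ++ [v]))
    (init_scmgr, [init_scmgr])
  let g_table := st.2
  let g_index : Int := 0
  let v0 := PySem.Int.band (g_index - 1) 0x1f
  let v2 := PySem.Int.bxor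
      (PySem.Int.bxor (PySem.List.pyGetD g_table (PySem.Int.band (g_index + 3) 0x1f) 0)
        (PySem.List.pyGetD g_table g_index 0))
      ((PySem.List.pyGetD g_table (PySem.Int.band (g_index + 3) 0x1f) 0) >>> (8 : Nat))
  let v1 := PySem.List.pyGetD g_table v0 0
  let v3 := PySem.List.pyGetD g_table (PySem.Int.band (g_index + 10) 0x1F) 0
  let v4 := PySem.Int.bxor
      (PySem.Int.bxor (PySem.List.pyGetD g_table (PySem.Int.band (g_index - 8) 0x1F) 0) v3)
      ((PySem.Int.bxor v3 (32 * PySem.List.pyGetD g_table (PySem.Int.band (g_index - 8) 0x1F) 0)) <<< (14 : Nat))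
  let v4 := PySem.Int.band v4 0xffffffff
  let g_table := PySem.List.pySetD g_table g_index (PySem.Int.bxor v2 v4)
  let g_table := PySem.List.pySetD g_table v0
      (PySem.Int.band
        (PySem.Int.bxor (PySem.Int.bxor (PySem.Int.bxor v1 v2) v4)
          ((PySem.Int.bxor v2 (16 * (PySem.Int.bxor v1 (4 * v4)))) <<< (7 : Nat)))
        0xffffffff)
  let g_index := PySem.Int.band (g_index - 1) 0x1F
  PySem.List.pyGetD g_table g_index 0

-- ===== PORT B =====
-- entry(i) of Source B: g_table[i] in closed form (index 0 is the raw, unmasked key)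
def encrypt2_entry (key : Int) (i : Nat) : Int :=
  if i = 0 then key
  else PySem.Int.band (key * PySem.Int.powMod 69069 i 4294967296) 0xffffffff

def encrypt2_alt (key : Int) : Int :=
  let t0 := encrypt2_entry key 0
  let t3 := encrypt2_entry key 3
  let t10 := encrypt2_entry key 10
  let t24 := encrypt2_entry key 24
  let t31 := encrypt2_entry key 31
  let v2 := PySem.Int.bxor (PySem.Int.bxor t3 t0) (t3 >>> (8 : Nat))
  let v4 := PySem.Int.band
      (PySem.Int.bxor (PySem.Int.bxor t24 t10) ((PySem.Int.bxor t10 (32 * t24)) <<< (14 : Nat)))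
      0xffffffff
  PySem.Int.band
    (PySem.Int.bxor (PySem.Int.bxor (PySem.Int.bxor t31 v2) v4)
      ((PySem.Int.bxor v2 (16 * (PySem.Int.bxor t31 (4 * v4)))) <<< (7 : Nat)))
    0xffffffff

-- ===== PRECONDITION & SPEC =====
def Spec_encrypt2 (key : Int) (out : Int) : Prop := out = encrypt2_alt key
instance (key : Int) (out : Int) : Decidable (Spec_encrypt2 key out) := by unfold Spec_encrypt2; infer_instance

-- ===== CLAIM (what is proved, stated in full; the proofs are below) =====
def Claim_equal_encrypt2 : Prop := ∀ (key : Int), Dom_encrypt2 key → Spec_encrypt2 key (encrypt2 key)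

-- ===== LEMMAS AND PROOFS =====

-- Python's  x & 0xffffffff  is  x mod 2^32, also for negative x.
theorem band_mask_eq_emod (x : Int) : PySem.Int.band x 4294967295 = x % 4294967296 := by
  unfold PySem.Int.band
  by_cases hx : 0 ≤ x
  · rw [if_pos hx, if_pos (by norm_num)]
    simp only [show Int.toNat 4294967295 = 4294967295 from rfl]
    have h := Nat.and_two_pow_sub_one_eq_mod x.toNat 32
    norm_num at h
    rw [h]
    omega
  · rw [if_neg hx, if_pos (by norm_num)]
    simp only [show Int.toNat 4294967295 = 4294967295 from rfl]
    generalize hy : (-x - 1).toNat = y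
    have h := Nat.and_two_pow_sub_one_eq_mod y 32
    rw [Nat.and_comm] at h
    norm_num at h
    rw [h]
    omega

theorem mulmod_left (a b : Int) : (a % 4294967296 * b) % 4294967296 = (a * b) % 4294967296 := by
  conv_rhs => rw [Int.mul_emod]
  rw [Int.mul_emod (a % 4294967296) b, Int.emod_emod_of_dvd a dvd_rfl]

theorem mulmod_right (a b : Int) : (a * (b % 4294967296)) % 4294967296 = (a * b) % 4294967296 := by
  conv_rhs => rw [Int.mul_emod]
  rw [Int.mul_emod a (b % 4294967296), Int.emod_emod_of_dvd b dvd_rfl]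

-- one step of A's PRNG recurrence
def stepA (s : Int) : Int := PySem.Int.band (s * 69069) 4294967295

-- A's loop, characterised: it ends at the 31st iterate and the table lists the iterates in order
theorem loopA (l : List Int) (s : Int) (acc : List Int) :
    l.foldl
      (fun (p : Int × List Int) _ =>
        (PySem.Int.band (p.1 * 69069) 4294967295,
         p.2 ++ [PySem.Int.band (p.1 * 69069) 4294967295]))
      (s, acc)
    = (stepA^[l.length] s,
       acc ++ (List.range l.length).map (fun i => stepA^[i + 1] s)) := by
  induction l generalizing s acc with
  | nil => simp
  | cons x l ih =>
      rw [List.foldl_cons]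
      refine Eq.trans (ih (stepA s) (acc ++ [stepA s])) ?_
      rw [List.length_cons]
      refine Prod.ext ?_ ?_
      · exact (Function.iterate_succ_apply stepA l.length s).symm
      · have hf : (fun i => stepA^[i + 1] (stepA s)) = ((fun i => stepA^[i + 1] s) ∘ Nat.succ) :=
          funext fun i => (Function.iterate_succ_apply stepA (i + 1) s).symm
        rw [← List.append_cons, List.range_succ_eq_map, List.map_cons, List.map_map, hf]
        exact congrArg (fun z => acc ++ z :: List.map ((fun i => stepA^[i + 1] s) ∘ Nat.succ) (List.range l.length)) (by simp)

theorem tab_eq (key : Int) :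
    [key] ++ (List.range 31).map (fun i => stepA^[i + 1] key)
      = (List.range 32).map (fun n => stepA^[n] key) := by
  have h32 : List.range 32 = 0 :: List.map Nat.succ (List.range 31) :=
    List.range_succ_eq_map (n := 31)
  rw [h32, List.map_cons, List.map_map, List.singleton_append]
  exact congrArg₂ List.cons (by simp)
    (List.map_congr_left fun i _ => by simp [Nat.succ_eq_add_one])

theorem iter_eq (key : Int) (n : Nat) :
    stepA^[n + 1] key = (key * 69069 ^ (n + 1)) % 4294967296 := by
  induction n with
  | zero => simp [stepA, band_mask_eq_emod]
  | succ n ih =>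
      rw [Function.iterate_succ_apply', ih, stepA, band_mask_eq_emod, mulmod_left]
      ring_nf

theorem entry_eq (key : Int) (i : Nat) (h : i ≠ 0) :
    encrypt2_entry key i = (key * 69069 ^ i) % 4294967296 := by
  rw [encrypt2_entry, if_neg h, band_mask_eq_emod,
    PySem.Int.powMod_eq_emod 69069 i (by norm_num), mulmod_right]

-- ===== VERDICT (by name: the statement is the Claim_ definition above) =====
theorem encrypt2_spec : Claim_equal_encrypt2 := by
  intro key _
  show encrypt2 key = encrypt2_alt key
  have e3 : stepA^[(3 : Nat)] key = (key * 69069 ^ 3) % 4294967296 := by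
    simpa using iter_eq key 2
  have e10 : stepA^[(10 : Nat)] key = (key * 69069 ^ 10) % 4294967296 := by
    simpa using iter_eq key 9
  have e24 : stepA^[(24 : Nat)] key = (key * 69069 ^ 24) % 4294967296 := by
    simpa using iter_eq key 23
  have e31 : stepA^[(31 : Nat)] key = (key * 69069 ^ 31) % 4294967296 := by
    simpa using iter_eq key 30
  simp only [encrypt2, encrypt2_alt]
  rw [loopA (PySem.List.pyRange 0 31 1) key [key],
    show (PySem.List.pyRange 0 31 1).length = 31 from rfl]
  simp only [tab_eq key]
  rw [show PySem.Int.band (0 + 3) 31 = (3 : Int) from by decide,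
    show PySem.Int.band (0 + 10) 31 = (10 : Int) from by decide,
    show PySem.Int.band (0 - 8) 31 = (24 : Int) from by decide,
    show PySem.Int.band (0 - 1) 31 = (31 : Int) from by decide]
  rw [PySem.List.pySetD_of_nonneg _ _ (by norm_num : (0:Int) ≤ 0),
    PySem.List.pySetD_of_nonneg _ _ (by norm_num : (0:Int) ≤ 31)]
  simp only [PySem.List.pyGetD_ofNat', show Int.toNat 31 = 31 from rfl, Int.toNat_zero]
  have hread : ∀ (u w : Int) (xs : List Int), xs.length = 32 →
      (((xs.set 0 u).set 31 w).getD 31 0) = w := by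
    intro u w xs h
    rw [List.getD_eq_getElem?_getD, List.getElem?_set_self (by simp [h])]
    rfl
  rw [hread _ _ _ (by simp)]
  rw [PySem.List.getD_map_range _ 32 3 0 (by norm_num),
    PySem.List.getD_map_range _ 32 0 0 (by norm_num),
    PySem.List.getD_map_range _ 32 10 0 (by norm_num),
    PySem.List.getD_map_range _ 32 24 0 (by norm_num),
    PySem.List.getD_map_range _ 32 31 0 (by norm_num)]
  simp only [e3, e10, e24, e31, Function.iterate_zero_apply,
    entry_eq key 3 (by norm_num), entry_eq key 10 (by norm_num),
    entry_eq key 24 (by norm_num), entry_eq key 31 (by norm_num),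
    show encrypt2_entry key 0 = key from rfl]
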